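-- pv_equiv track=rewrite | github.com/zzsfornlp/opera-TA1-qa | parse_topics.py | simple_negation
-- ===== SOURCE A (Python) =====
-- def simple_negation(tokens):
--     # todo: really bad replacements here ...
--     REPL_MAP0 = {
--         "can": "can not", "may": "may not",
--         "is": "isn't", "was": "wasn't", "are": "aren't", "were": "weren't", "will": "won't",
--         "did": "didn't", "does": "doesn't", "do": "don't",
--     }
--     REPL_MAPS = {
--         z: z[:-1] for z in ["transmits", "transfers", "destroys", "prevents", "cures", "shortens", "reduces"]}  # does not
--     REPL_MAPD = {"created": "create", "funded": "fund", "enacted": "enact", "received": "receive"}  # did not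
--     # --
--     ret = []
--     hit_neg = False
--     for t in tokens:
--         if not hit_neg:
--             if t in REPL_MAP0:
--                 ret.extend(REPL_MAP0[t].split())
--                 hit_neg = True
--                 continue  # skip this token!
--             elif t in REPL_MAPS:
--                 hit_neg = True
--                 ret.extend("does not".split())
--             elif t in REPL_MAPD:
--                 hit_neg = True
--                 ret.extend("did not".split())
--         # add token
--         if t in REPL_MAPS:
--             ret.extend(REPL_MAPS[t].split())
--         elif t in REPL_MAPD:
--             ret.extend(REPL_MAPD[t].split())
--         else:
--             ret.append(t)
--     # --
--     return ret
-- ===== SOURCE B (Python) =====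
-- def simple_negation(tokens):
--     REPL_MAP0 = {
--         "can": "can not", "may": "may not",
--         "is": "isn't", "was": "wasn't", "are": "aren't", "were": "weren't", "will": "won't",
--         "did": "didn't", "does": "doesn't", "do": "don't",
--     }
--     REPL_MAPS = {
--         z: z[:-1] for z in ["transmits", "transfers", "destroys", "prevents", "cures", "shortens", "reduces"]}
--     REPL_MAPD = {"created": "create", "funded": "fund", "enacted": "enact", "received": "receive"}
--     toks = list(tokens)
--     # index of the first token that is a key of any map (the negation trigger)
--     i = next((k for k, t in enumerate(toks)
--               if t in REPL_MAP0 or t in REPL_MAPS or t in REPL_MAPD), None)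
--     if i is None:
--         return toks
--     t = toks[i]
--     if t in REPL_MAP0:
--         exp = REPL_MAP0[t].split()
--     elif t in REPL_MAPS:
--         exp = ["does", "not", REPL_MAPS[t]]
--     else:
--         exp = ["did", "not", REPL_MAPD[t]]
--     # tokens after the trigger: singularize MAPS/MAPD keys, keep everything else verbatim
--     return toks[:i] + exp + [REPL_MAPS.get(s, REPL_MAPD.get(s, s)) for s in toks[i + 1:]]
-- ===== Notes on version B (the rewrite author's own statement) =====
-- stated objective: alternative
-- what changed: Replaces the single stateful loop with a hit_neg flag by a find-first-trigger index, then builds the result as verbatim prefix ++ trigger expansion ++ suffix mapped through a pure singularizing function.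
import Mathlib
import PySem

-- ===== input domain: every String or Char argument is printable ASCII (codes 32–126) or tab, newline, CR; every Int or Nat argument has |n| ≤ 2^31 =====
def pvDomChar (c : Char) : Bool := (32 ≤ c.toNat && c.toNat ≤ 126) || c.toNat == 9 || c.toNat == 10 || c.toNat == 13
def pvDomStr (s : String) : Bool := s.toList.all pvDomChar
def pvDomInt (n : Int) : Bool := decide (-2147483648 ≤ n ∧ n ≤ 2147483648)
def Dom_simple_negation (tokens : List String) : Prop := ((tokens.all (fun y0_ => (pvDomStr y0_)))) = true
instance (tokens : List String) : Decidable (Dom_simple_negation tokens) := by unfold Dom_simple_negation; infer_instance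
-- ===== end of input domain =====

-- B changes the decomposition (find-first-trigger index + prefix/expansion/mapped-suffix instead of a
-- stateful flag loop); same cost, no behaviour change.

-- ===== PORT A =====
-- the three replacement dicts (literal dicts of A and of B)
def REPL_MAP0 : PySem.Dict String String := PySem.Dict.ofList
  [("can", "can not"), ("may", "may not"),
   ("is", "isn't"), ("was", "wasn't"), ("are", "aren't"), ("were", "weren't"), ("will", "won't"),
   ("did", "didn't"), ("does", "doesn't"), ("do", "don't")]
def REPL_MAPS : PySem.Dict String String := PySem.Dict.ofList
  [("transmits", "transmit"), ("transfers", "transfer"), ("destroys", "destroy"),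
   ("prevents", "prevent"), ("cures", "cure"), ("shortens", "shorten"), ("reduces", "reduce")]
def REPL_MAPD : PySem.Dict String String := PySem.Dict.ofList
  [("created", "create"), ("funded", "fund"), ("enacted", "enact"), ("received", "receive")]

-- the "add token" tail section of A's loop body
def addTok (ret : List String) (t : String) : List String :=
  match REPL_MAPS.get? t with
  | some v => ret ++ PySem.Str.split₀ v
  | none =>
    match REPL_MAPD.get? t with
    | some v => ret ++ PySem.Str.split₀ v
    | none => ret ++ [t]

-- A's loop over (ret, hit_neg)
def loopA : List String → List String → Bool → List String
  | [], ret, _ => ret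
  | t :: rest, ret, hit =>
    if !hit then
      match REPL_MAP0.get? t with
      | some v => loopA rest (ret ++ PySem.Str.split₀ v) true   -- continue: skip add-token
      | none =>
        if REPL_MAPS.contains t then loopA rest (addTok (ret ++ ["does", "not"]) t) true
        else if REPL_MAPD.contains t then loopA rest (addTok (ret ++ ["did", "not"]) t) true
        else loopA rest (addTok ret t) hit
    else loopA rest (addTok ret t) hit

def simple_negation (tokens : List String) : List String := loopA tokens [] false

-- ===== PORT B =====
def isTrig (t : String) : Bool :=
  REPL_MAP0.contains t || REPL_MAPS.contains t || REPL_MAPD.contains t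

-- REPL_MAPS.get(s, REPL_MAPD.get(s, s))
def baseB (s : String) : String := REPL_MAPS.getD s (REPL_MAPD.getD s s)

def simple_negation_alt (tokens : List String) : List String :=
  match tokens.findIdx? isTrig with
  | none => tokens
  | some i =>
    let t := tokens.getD i ""    -- toks[i]; i is a valid index produced by the search, so getD is exact
    let exp : List String :=
      match REPL_MAP0.get? t with
      | some v => PySem.Str.split₀ v
      | none =>
        match REPL_MAPS.get? t with
        | some v => ["does", "not", v]
        | none => ["did", "not", REPL_MAPD.getD t t]
    tokens.take i ++ exp ++ (tokens.drop (i + 1)).map baseB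

-- ===== PRECONDITION & SPEC =====
def Spec_simple_negation (tokens : List String) (out : List String) : Prop := out = simple_negation_alt tokens
instance (tokens : List String) (out : List String) : Decidable (Spec_simple_negation tokens out) := by unfold Spec_simple_negation; infer_instance

-- ===== CLAIM (what is proved, stated in full; the proofs are below) =====
def Claim_equal_simple_negation : Prop := ∀ (tokens : List String), Dom_simple_negation tokens → Spec_simple_negation tokens (simple_negation tokens)

-- ===== LEMMAS AND PROOFS =====

-- literal item lists of the two singularizing dicts
lemma itemsS : REPL_MAPS.items =
    [("transmits", "transmit"), ("transfers", "transfer"), ("destroys", "destroy"),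
     ("prevents", "prevent"), ("cures", "cure"), ("shortens", "shorten"), ("reduces", "reduce")] := by rfl

lemma itemsD : REPL_MAPD.items =
    [("created", "create"), ("funded", "fund"), ("enacted", "enact"), ("received", "receive")] := by rfl

-- split() of a nonempty all-non-whitespace string is the singleton (proved via split₀'s worker loop)
lemma go_nospace (cs : List Char) : ∀ cur acc, (∀ c ∈ cs, PySem.Chars.isspace c = false) →
    PySem.Chars.split₀.go cs cur acc = PySem.Chars.split₀.go [] (cs.reverse ++ cur) acc := by
  induction cs with
  | nil => intro cur acc _; simp
  | cons c rest ih =>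
    intro cur acc h
    conv_lhs => rw [PySem.Chars.split₀.go]
    rw [if_neg (by simp [h c (List.mem_cons_self)])]
    rw [ih (c :: cur) acc (fun x hx => h x (List.mem_cons_of_mem _ hx))]
    simp

lemma split₀_single (v : String) (h1 : v.toList ≠ [])
    (h2 : v.toList.all (fun c => !(PySem.Chars.isspace c)) = true) :
    PySem.Str.split₀ v = [v] := by
  have h2' : ∀ c ∈ v.toList, PySem.Chars.isspace c = false := by
    intro c hc
    simpa using List.all_eq_true.mp h2 c hc
  unfold PySem.Str.split₀ PySem.Chars.split₀
  rw [go_nospace _ _ _ h2']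
  conv_lhs => rw [PySem.Chars.split₀.go]
  rw [if_neg (by simp [h1])]
  simp

-- every value of REPL_MAPS / REPL_MAPD is a single word: split() of it is the singleton
set_option maxRecDepth 4096 in
lemma splitS {t v : String} (h : REPL_MAPS.get? t = some v) : PySem.Str.split₀ v = [v] := by
  have hm : (t, v) ∈ REPL_MAPS.items := by
    apply PySem.Dict.mem_items_of_get?_eq_some; exact h
  rw [itemsS] at hm
  simp only [List.mem_cons, List.not_mem_nil, or_false, Prod.mk.injEq] at hm
  rcases hm with ⟨_, hv⟩ | ⟨_, hv⟩ | ⟨_, hv⟩ | ⟨_, hv⟩ | ⟨_, hv⟩ | ⟨_, hv⟩ | ⟨_, hv⟩ <;> subst hv <;>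
    exact split₀_single _ (by decide) (by decide)

set_option maxRecDepth 4096 in
lemma splitD {t v : String} (h : REPL_MAPD.get? t = some v) : PySem.Str.split₀ v = [v] := by
  have hm : (t, v) ∈ REPL_MAPD.items := by
    apply PySem.Dict.mem_items_of_get?_eq_some; exact h
  rw [itemsD] at hm
  simp only [List.mem_cons, List.not_mem_nil, or_false, Prod.mk.injEq] at hm
  rcases hm with ⟨_, hv⟩ | ⟨_, hv⟩ | ⟨_, hv⟩ | ⟨_, hv⟩ <;> subst hv <;>
    exact split₀_single _ (by decide) (by decide)

lemma get?_none_of_contains_false {d : PySem.Dict String String} {t : String}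
    (h : d.contains t = false) : d.get? t = none := by
  have := PySem.Dict.contains_eq_isSome_get? (d := d) (k := t)
  rw [h] at this
  exact Option.not_isSome_iff_eq_none.mp (by rw [← this]; simp)

-- the add-token section always appends exactly the base-mapped token
lemma addTok_eq (ret : List String) (t : String) : addTok ret t = ret ++ [baseB t] := by
  unfold addTok baseB
  cases hS : REPL_MAPS.get? t with
  | some v => simp [hS, splitS hS, PySem.Dict.getD_eq_get?_getD]
  | none =>
    cases hD : REPL_MAPD.get? t with
    | some v => simp [hS, hD, splitD hD, PySem.Dict.getD_eq_get?_getD]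
    | none => simp [hS, hD, PySem.Dict.getD_eq_get?_getD]

lemma loopA_true (ts : List String) : ∀ ret, loopA ts ret true = ret ++ ts.map baseB := by
  induction ts with
  | nil => intro ret; simp [loopA]
  | cons t rest ih => intro ret; simp [loopA, addTok_eq, ih]

lemma baseB_of_not_trig {t : String} (h : isTrig t = false) : baseB t = t := by
  unfold isTrig at h
  simp only [Bool.or_eq_false_iff] at h
  simp [baseB, PySem.Dict.getD_eq_get?_getD,
    get?_none_of_contains_false h.1.2, get?_none_of_contains_false h.2]

lemma loopA_false (ts : List String) : ∀ ret, loopA ts ret false = ret ++ simple_negation_alt ts := by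
  induction ts with
  | nil => intro ret; simp [loopA, simple_negation_alt]
  | cons t rest ih =>
    intro ret
    unfold loopA
    by_cases hT : isTrig t = true
    · have hfind : (t :: rest).findIdx? isTrig = some 0 := by
        rw [List.findIdx?_cons, hT]; rfl
      cases h0 : REPL_MAP0.get? t with
      | some v =>
        rw [if_pos (show (!false) = true from rfl)]
        simp [simple_negation_alt, hfind, h0, loopA_true]
      | none =>
        have h0c : REPL_MAP0.contains t = false := by
          rw [PySem.Dict.contains_eq_isSome_get?, h0]; rfl
        rw [if_pos (show (!false) = true from rfl)]
        by_cases hSc : REPL_MAPS.contains t = true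
        · have hSome : (REPL_MAPS.get? t).isSome := by
            rw [← PySem.Dict.contains_eq_isSome_get?, hSc]
          obtain ⟨v, hS⟩ := Option.isSome_iff_exists.mp hSome
          rw [if_pos hSc, addTok_eq, loopA_true]
          have hb : baseB t = v := by simp [baseB, PySem.Dict.getD_eq_get?_getD, hS]
          simp [simple_negation_alt, hfind, h0, hS, hb]
        · have hSc' : REPL_MAPS.contains t = false := by simpa using hSc
          have hSn : REPL_MAPS.get? t = none := get?_none_of_contains_false hSc'
          have hDc : REPL_MAPD.contains t = true := by
            unfold isTrig at hT
            simp only [h0c, hSc', Bool.false_or] at hT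
            exact hT
          have hDSome : (REPL_MAPD.get? t).isSome := by
            rw [← PySem.Dict.contains_eq_isSome_get?, hDc]
          obtain ⟨v, hD⟩ := Option.isSome_iff_exists.mp hDSome
          rw [if_neg (by simp [hSc']), if_pos hDc, addTok_eq, loopA_true]
          have hb : baseB t = v := by simp [baseB, PySem.Dict.getD_eq_get?_getD, hSn, hD]
          have hgd : REPL_MAPD.getD t t = v := by simp [PySem.Dict.getD_eq_get?_getD, hD]
          simp [simple_negation_alt, hfind, h0, hSn, hb, hgd]
    · have hT' : isTrig t = false := by simpa using hT
      have hcs := hT'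
      unfold isTrig at hcs
      simp only [Bool.or_eq_false_iff] at hcs
      have h0n : REPL_MAP0.get? t = none := get?_none_of_contains_false hcs.1.1
      have hfind : (t :: rest).findIdx? isTrig = (rest.findIdx? isTrig).map (· + 1) := by
        rw [List.findIdx?_cons, hT']; rfl
      simp only [h0n, hcs.1.2, hcs.2]
      rw [if_pos (show (!false) = true from rfl)]
      rw [if_neg (by simp), if_neg (by simp)]
      rw [ih]
      unfold simple_negation_alt
      rw [hfind]
      cases hf : rest.findIdx? isTrig with
      | none => simp [addTok_eq, baseB_of_not_trig hT']
      | some i =>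
        simp [addTok_eq, baseB_of_not_trig hT', List.take_succ_cons, List.drop_succ_cons]

-- ===== VERDICT (by name: the statement is the Claim_ definition above) =====
theorem simple_negation_spec : Claim_equal_simple_negation := by
  intro tokens _
  unfold Spec_simple_negation simple_negation
  simpa using loopA_false tokens []
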